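-- pv_equiv track=rewrite | github.com/real-moo/Programmers_solution | Level 1/1주차_부족한 금액 계산하기.py | solution
-- ===== SOURCE A (Python) =====
-- def solution(price, money, count):
--     answer = []
--
--     for i in range(1, count+1):
--         answer.append(price * i)
--
--     result = sum(answer) - money
--
--     if (result <= 0) :
--         return 0
--     else:
--         return result
-- ===== SOURCE B (Python) =====
-- def solution(price, money, count):
--     n = count if count > 0 else 0
--     result = price * (n * (n + 1) // 2) - money
--     return result if result > 0 else 0
-- ===== Notes on version B (the rewrite author's own statement) =====
-- stated objective: faster
-- what changed: Replaced the O(count) loop that builds a list of per-item costs and sums it with the closed-form arithmetic-series formula price*n*(n+1)/2, clamped at zero.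
import Mathlib
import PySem

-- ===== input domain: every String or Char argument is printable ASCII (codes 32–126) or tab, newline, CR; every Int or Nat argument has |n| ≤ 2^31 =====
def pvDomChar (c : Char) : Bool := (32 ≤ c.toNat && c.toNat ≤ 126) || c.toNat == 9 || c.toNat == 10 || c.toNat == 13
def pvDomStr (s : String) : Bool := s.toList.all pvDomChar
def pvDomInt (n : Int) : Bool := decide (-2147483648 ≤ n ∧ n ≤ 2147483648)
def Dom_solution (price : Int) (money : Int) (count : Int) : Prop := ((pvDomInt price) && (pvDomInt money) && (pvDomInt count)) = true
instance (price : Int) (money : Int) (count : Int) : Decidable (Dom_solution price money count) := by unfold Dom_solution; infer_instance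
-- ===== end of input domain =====

-- B replaces A's O(count) accumulation loop with the closed-form arithmetic-series sum (objective: faster, asymptotic).


-- ===== PORT A =====
def solution (price : Int) (money : Int) (count : Int) : Int :=
  let answer := (PySem.List.pyRange 1 (count + 1) 1).foldl (fun acc i => acc ++ [price * i]) []
  let result := answer.sum - money
  if result ≤ 0 then 0 else result

-- ===== PORT B =====
def solution_alt (price : Int) (money : Int) (count : Int) : Int :=
  let n := if count > 0 then count else 0
  let result := price * PySem.Int.floordiv (n * (n + 1)) 2 - money
  if result > 0 then result else 0

-- ===== PRECONDITION & SPEC =====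
def Spec_solution (price : Int) (money : Int) (count : Int) (out : Int) : Prop := out = solution_alt price money count
instance (price : Int) (money : Int) (count : Int) (out : Int) : Decidable (Spec_solution price money count out) := by unfold Spec_solution; infer_instance

-- ===== CLAIM (what is proved, stated in full; the proofs are below) =====
def Claim_equal_solution : Prop := ∀ (price : Int) (money : Int) (count : Int), Dom_solution price money count → Spec_solution price money count (solution price money count)

-- ===== LEMMAS AND PROOFS =====

theorem pv_foldl_append (f : Int → Int) (xs : List Int) (acc : List Int) :
    xs.foldl (fun a i => a ++ [f i]) acc = acc ++ xs.map f := by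
  induction xs generalizing acc with
  | nil => simp
  | cons x xs ih => simp [List.foldl, ih]

theorem pv_sum_range (price : Int) (m : Nat) :
    (((PySem.List.pyRange 1 ((m : Int) + 1) 1).map (fun i => price * i)).sum) * 2
      = price * ((m : Int) * ((m : Int) + 1)) := by
  induction m with
  | zero =>
    rw [show ((0 : Nat) : Int) + 1 = 1 by norm_num, PySem.List.pyRange_one_eq_nil le_rfl]
    simp
  | succ m ih =>
    rw [show (((m + 1 : Nat)) : Int) + 1 = ((m : Int) + 1) + 1 by push_cast; ring,
        PySem.List.pyRange_one_succ_right (by omega : (1 : Int) ≤ (m : Int) + 1),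
        List.map_append, List.sum_append]
    simp only [List.map_cons, List.map_nil, List.sum_cons, List.sum_nil, add_zero]
    push_cast
    nlinarith [ih]

theorem pv_sum_answer (price : Int) (count : Int) :
    ((PySem.List.pyRange 1 (count + 1) 1).foldl (fun acc i => acc ++ [price * i]) []).sum =
      price * PySem.Int.floordiv ((if count > 0 then count else 0) * ((if count > 0 then count else 0) + 1)) 2 := by
  rw [pv_foldl_append, PySem.Int.floordiv_eq_ediv_of_pos (by norm_num)]
  by_cases h : count > 0
  · simp only [h, if_pos]
    have hm : ((count.toNat : Int)) = count := by omega
    obtain ⟨s, hs⟩ : Even (count * (count + 1)) := Int.even_mul_succ_self count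
    have hsum := pv_sum_range price count.toNat
    rw [hm] at hsum
    have hdiv : count * (count + 1) / 2 = s := by omega
    rw [hdiv]
    have h2 : (((PySem.List.pyRange 1 (count + 1) 1).map (fun i => price * i)).sum) * 2
        = (price * s) * 2 := by rw [hsum, hs]; ring
    simpa using mul_right_cancel₀ (by norm_num : (2 : Int) ≠ 0) h2
  · rw [PySem.List.pyRange_one_eq_nil (by omega : count + 1 ≤ 1)]
    simp [h]

theorem solution_spec : Claim_equal_solution := by
  intro price money count _
  unfold Spec_solution solution solution_alt
  simp only []
  rw [pv_sum_answer]
  split_ifs <;> omega
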